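-- pv_equiv track=rewrite | github.com/jins408/Algorithm | Practice/deque_test.py | solution
-- ===== SOURCE A (Python) =====
-- from collections import deque
--
-- def solution(garden):
--
--     q = deque()
--     n = len(garden)
--
--     dr = [1,-1,0,0]
--     dc = [0,0,-1,1]
--     cnt = 0
--     for i in range(n):
--         for j in range(n):
--             if garden[i][j] == 1:
--                 q.append([i,j])
--                 cnt += 1
--     if cnt == n*n:
--         return 0
--
--
--     t=0
--     while q:
--         t += 1
--         for _ in range(len(q)):
--             r, c = q.popleft()
--
--             for i in range(4):
--                 nr = r+dr[i]
--                 nc = c+dc[i]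
--                 if(0<=nr<n and 0<=nc<n and garden[nr][nc]==0):
--                     q.append([nr,nc])
--                     garden[nr][nc] = 1
--                     cnt += 1
--                     if cnt == n*n:
--                         return t
-- ===== SOURCE B (Python) =====
-- def solution(garden):
--     # Synchronous grid dilation: no queue/frontier; each pass rescans the whole
--     # grid and marks every 0-cell adjacent to a 1-cell, until a pass finds
--     # nothing to mark.  (Works on a copy; A mutates its argument.)
--     n = len(garden)
--     g = [row[:] for row in garden]
--     t = 0
--     while True:
--         boundary = [(i, j) for i in range(n) for j in range(n)
--                     if g[i][j] == 0 and ((i > 0 and g[i - 1][j] == 1) or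
--                                          (i + 1 < n and g[i + 1][j] == 1) or
--                                          (j > 0 and g[i][j - 1] == 1) or
--                                          (j + 1 < n and g[i][j + 1] == 1))]
--         if not boundary:
--             break
--         t += 1
--         for i, j in boundary:
--             g[i][j] = 1
--     if all(g[i][j] == 1 for i in range(n) for j in range(n)):
--         return t
--     return None
-- ===== Notes on version B (the rewrite author's own statement) =====
-- stated objective: alternative
-- what changed: A runs a queue-based multi-source BFS, popping frontier cells one by one, mutating the grid and early-returning the moment a fill counter reaches n*n; B keeps no queue, frontier or counter at all: it repeatedly rescans the whole grid, in each pass synchronously marking every 0-cell adjacent to a 1-cell, until a pass marks nothing, then returns the number of passes if the grid is all 1s and None otherwise.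
import Mathlib
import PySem

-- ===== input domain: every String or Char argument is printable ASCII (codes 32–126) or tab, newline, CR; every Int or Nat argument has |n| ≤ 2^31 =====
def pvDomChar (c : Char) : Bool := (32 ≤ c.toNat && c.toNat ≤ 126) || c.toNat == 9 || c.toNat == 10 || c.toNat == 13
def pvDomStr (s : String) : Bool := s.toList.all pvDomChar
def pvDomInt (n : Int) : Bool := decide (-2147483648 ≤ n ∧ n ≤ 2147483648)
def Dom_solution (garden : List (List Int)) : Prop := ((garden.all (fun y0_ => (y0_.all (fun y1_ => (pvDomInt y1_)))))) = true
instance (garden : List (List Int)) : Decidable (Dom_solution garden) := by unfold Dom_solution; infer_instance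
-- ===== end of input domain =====

-- B replaces A's queue-based multi-source BFS (pop a frontier cell, mark its empty
-- neighbours, early-return when a fill counter reaches n*n) by a queueless synchronous
-- dilation: rescan the whole grid each round, mark every 0-cell adjacent to a 1-cell,
-- stop when a scan marks nothing, then return the round count if the grid is all 1s.
-- A mutates its argument (B works on a copy): the equivalence is about the return value.

-- ===== PORT A =====
-- shared indexing helpers: exact for the nonnegative in-range indices at which both ports use them
def gcell (g : List (List Int)) (r c : Int) : Int :=
  PySem.List.pyGetD (PySem.List.pyGetD g r []) c 0
def gsetOne (g : List (List Int)) (r c : Int) : List (List Int) :=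
  PySem.List.pySetD g r (PySem.List.pySetD (PySem.List.pyGetD g r []) c 1)
abbrev StA := List (List Int) × List (Int × Int) × Int
def stepA (n t : Int) (p : Int × Int) (acc : Int ⊕ StA) : Int ⊕ StA :=
  match acc with
  | .inl v => .inl v
  | .inr (g, q, cnt) =>
    if 0 ≤ p.1 ∧ p.1 < n ∧ 0 ≤ p.2 ∧ p.2 < n ∧ gcell g p.1 p.2 = 0 then
      let q' := q ++ [p]
      let g' := gsetOne g p.1 p.2
      let cnt' := cnt + 1
      if cnt' = n * n then .inl t else .inr (g', q', cnt')
    else .inr (g, q, cnt)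
def drA : List Int := [1, -1, 0, 0]
def dcA : List Int := [0, 0, -1, 1]
def neighA (n t r c : Int) (st : StA) : Int ⊕ StA :=
  (PySem.List.pyRange 0 4 1).foldl (fun acc i =>
    stepA n t (r + PySem.List.pyGetD drA i 0, c + PySem.List.pyGetD dcA i 0) acc) (.inr st)
def roundA (n t : Int) (k : Nat) (st : StA) : Int ⊕ StA :=
  match k with
  | 0 => .inr st
  | k + 1 =>
    match st with
    | (g, q, cnt) =>
      match q with
      | [] => .inr (g, q, cnt)
      | (r, c) :: rest =>
        match neighA n t r c (g, rest, cnt) with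
        | .inl v => .inl v
        | .inr st' => roundA n t k st'
def loopA (n : Int) (fuel : Nat) (st : StA) (t : Int) : Option Int :=
  match fuel with
  | 0 => none
  | fuel + 1 =>
    match st with
    | (g, q, cnt) =>
      match q with
      | [] => none
      | _ :: _ =>
        match roundA n (t + 1) q.length (g, q, cnt) with
        | .inl v => some v
        | .inr st' => loopA n fuel st' (t + 1)
def scanRowA (garden : List (List Int)) (n i : Int) (acc : List (Int × Int) × Int) :
    List (Int × Int) × Int :=
  (PySem.List.pyRange 0 n 1).foldl
    (fun acc j => if gcell garden i j = 1 then (acc.1 ++ [(i, j)], acc.2 + 1) else acc) acc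
def scanA (garden : List (List Int)) (n : Int) : List (Int × Int) × Int :=
  (PySem.List.pyRange 0 n 1).foldl (fun acc i => scanRowA garden n i acc) ([], 0)
def solution (garden : List (List Int)) : Option Int :=
  let n : Int := (garden.length : Int)
  let qc := scanA garden n
  if qc.2 = n * n then some 0
  else loopA n (garden.length * garden.length + 1) (garden, qc.1, qc.2) 0

-- ===== PORT B =====
-- boundary test of Source B's comprehension: g[i][j]==0 with some in-range neighbour ==1
def bndB (g : List (List Int)) (n i j : Int) : Bool :=
  (gcell g i j == 0) &&
  ((decide (0 < i) && (gcell g (i - 1) j == 1)) ||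
   (decide (i + 1 < n) && (gcell g (i + 1) j == 1)) ||
   (decide (0 < j) && (gcell g i (j - 1) == 1)) ||
   (decide (j + 1 < n) && (gcell g i (j + 1) == 1)))
def boundaryList (g : List (List Int)) (n : Int) : List (Int × Int) :=
  (PySem.List.pyRange 0 n 1).flatMap (fun i =>
    ((PySem.List.pyRange 0 n 1).filter (fun j => bndB g n i j)).map (fun j => (i, j)))
def setAllB (g : List (List Int)) (b : List (Int × Int)) : List (List Int) :=
  b.foldl (fun g p => gsetOne g p.1 p.2) g
def fullB (g : List (List Int)) (n : Int) : Bool :=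
  (PySem.List.pyRange 0 n 1).all (fun i =>
    (PySem.List.pyRange 0 n 1).all (fun j => gcell g i j == 1))
-- Source B's 'while True' loop; each productive pass marks at least one cell, so
-- n*n + 2 fuel is enough (proved below); rounds, then the final full-grid check
def loopB (n : Int) (fuel : Nat) (g : List (List Int)) (t : Int) : Option Int :=
  match fuel with
  | 0 => none
  | fuel + 1 =>
    if boundaryList g n = [] then (if fullB g n then some t else none)
    else loopB n fuel (setAllB g (boundaryList g n)) (t + 1)
def solution_alt (garden : List (List Int)) : Option Int :=
  let n : Int := (garden.length : Int)
  loopB n (garden.length * garden.length + 2) garden 0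

-- ===== PRECONDITION & SPEC =====
-- Pre_ excludes exactly the inputs on which A raises IndexError: some row shorter than the
-- number of rows (the source scan indexes every column j < len(garden) of every row).
def Pre_solution (garden : List (List Int)) : Prop :=
  ∀ row ∈ garden, (garden.length : Int) ≤ (row.length : Int)
instance (garden : List (List Int)) : Decidable (Pre_solution garden) := by
  unfold Pre_solution; infer_instance

def pvWitness_solution : List (List Int) := [[1, 0], [0, 0]]

def Spec_solution (garden : List (List Int)) (out : Option Int) : Prop := out = solution_alt garden
instance (garden : List (List Int)) (out : Option Int) : Decidable (Spec_solution garden out) := by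
  unfold Spec_solution; infer_instance

-- ===== CLAIM (what is proved, stated in full; the proofs are below) =====
def Claim_equal_solution : Prop :=
  ∀ (garden : List (List Int)), Dom_solution garden → Pre_solution garden →
    Spec_solution garden (solution garden)

-- ===== LEMMAS AND PROOFS =====

-- basic cell lemmas ---------------------------------------------------------

lemma pyGetD_nonneg {α : Type} (xs : List α) (i : Int) (d : α) (h : 0 ≤ i) :
    PySem.List.pyGetD xs i d = xs.getD i.toNat d := by
  obtain ⟨k, rfl⟩ := Int.eq_ofNat_of_zero_le h
  simp

lemma gcell_nonneg (g : List (List Int)) (r c : Int) (hr : 0 ≤ r) (hc : 0 ≤ c) :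
    gcell g r c = (g.getD r.toNat []).getD c.toNat 0 := by
  unfold gcell; rw [pyGetD_nonneg _ _ _ hr, pyGetD_nonneg _ _ _ hc]

lemma gsetOne_nonneg (g : List (List Int)) (r c : Int) (hr : 0 ≤ r) (hc : 0 ≤ c) :
    gsetOne g r c = g.set r.toNat ((g.getD r.toNat []).set c.toNat 1) := by
  unfold gsetOne
  rw [pyGetD_nonneg _ _ _ hr, PySem.List.pySetD_of_nonneg _ _ hc,
    PySem.List.pySetD_of_nonneg _ _ hr]

lemma listGetD_set {α : Type} (l : List α) (i j : Nat) (x d : α) (hi : i < l.length) :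
    (l.set i x).getD j d = if j = i then x else l.getD j d := by
  rcases eq_or_ne j i with rfl | h
  · simp [List.getD_eq_getElem?_getD, hi]
  · simp only [List.getD_eq_getElem?_getD, List.getElem?_set]
    rw [if_neg (Ne.symm h), if_neg h]

lemma gcell_gsetOne (g : List (List Int)) (r c r' c' : Int)
    (hr : 0 ≤ r) (hrl : r < (g.length : Int)) (hc : 0 ≤ c)
    (hcl : c < ((g.getD r.toNat []).length : Int)) (hr' : 0 ≤ r') (hc' : 0 ≤ c') :
    gcell (gsetOne g r c) r' c' = if r' = r ∧ c' = c then 1 else gcell g r' c' := by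
  rw [gsetOne_nonneg g r c hr hc, gcell_nonneg _ _ _ hr' hc', gcell_nonneg _ _ _ hr' hc']
  have hrN : r.toNat < g.length := by omega
  have hcN : c.toNat < (g.getD r.toNat []).length := by omega
  rw [listGetD_set g r.toNat r'.toNat _ [] hrN]
  by_cases hrr : r'.toNat = r.toNat
  · have hre : r' = r := by omega
    subst hre
    rw [if_pos hrr, listGetD_set _ c.toNat c'.toNat 1 0 hcN]
    by_cases hcc : c'.toNat = c.toNat
    · have hce : c' = c := by omega
      subst hce
      simp
    · have hce : ¬ (c' = c) := by omega
      rw [if_neg hcc, if_neg (by tauto)]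
  · have hre : ¬ (r' = r) := by omega
    rw [if_neg hrr, if_neg (by tauto)]

lemma length_gsetOne (g : List (List Int)) (r c : Int) (hr : 0 ≤ r) (hc : 0 ≤ c) :
    (gsetOne g r c).length = g.length := by
  rw [gsetOne_nonneg g r c hr hc]; simp

lemma rowlen_gsetOne (g : List (List Int)) (r c : Int) (hr : 0 ≤ r)
    (hrl : r < (g.length : Int)) (hc : 0 ≤ c) (i : Nat) :
    ((gsetOne g r c).getD i []).length = (g.getD i []).length := by
  rw [gsetOne_nonneg g r c hr hc]
  by_cases hi : i < g.length
  · rw [listGetD_set g r.toNat i _ [] (by omega)]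
    by_cases hir : i = r.toNat
    · rw [if_pos hir, List.length_set, hir]
    · rw [if_neg hir]
  · rw [List.getD_eq_default _ _ (by simp; omega), List.getD_eq_default _ _ (by omega)]

lemma stepA_inr (n t : Int) (p : Int × Int) (g : List (List Int)) (q : List (Int × Int)) (cnt : Int) :
    stepA n t p (.inr (g, q, cnt)) =
      if 0 ≤ p.1 ∧ p.1 < n ∧ 0 ≤ p.2 ∧ p.2 < n ∧ gcell g p.1 p.2 = 0 then
        (if cnt + 1 = n * n then .inl t else .inr (gsetOne g p.1 p.2, q ++ [p], cnt + 1))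
      else .inr (g, q, cnt) := rfl

lemma stepA_inl (n t : Int) (p : Int × Int) (v : Int) :
    stepA n t p (.inl v) = .inl v := rfl

lemma neighA_unfold (n t r c : Int) (st : StA) :
    neighA n t r c st =
      stepA n t (r, c + 1) (stepA n t (r, c - 1)
        (stepA n t (r - 1, c) (stepA n t (r + 1, c) (.inr st)))) := by
  unfold neighA
  rw [show PySem.List.pyRange 0 4 1 = [0, 1, 2, 3] from by decide]
  simp only [List.foldl]
  rw [show PySem.List.pyGetD drA (0:Int) 0 = 1 from by decide,
    show PySem.List.pyGetD drA (1:Int) 0 = -1 from by decide,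
    show PySem.List.pyGetD drA (2:Int) 0 = 0 from by decide,
    show PySem.List.pyGetD drA (3:Int) 0 = 0 from by decide,
    show PySem.List.pyGetD dcA (0:Int) 0 = 0 from by decide,
    show PySem.List.pyGetD dcA (1:Int) 0 = 0 from by decide,
    show PySem.List.pyGetD dcA (2:Int) 0 = -1 from by decide,
    show PySem.List.pyGetD dcA (3:Int) 0 = 1 from by decide]
  norm_num [sub_eq_add_neg]

-- abstract vocabulary -------------------------------------------------------

def InRng (n : Int) (p : Int × Int) : Prop := 0 ≤ p.1 ∧ p.1 < n ∧ 0 ≤ p.2 ∧ p.2 < n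

def nbrs (p : Int × Int) : List (Int × Int) :=
  [(p.1 + 1, p.2), (p.1 - 1, p.2), (p.1, p.2 - 1), (p.1, p.2 + 1)]

def Bnd (g : List (List Int)) (n : Int) (p : Int × Int) : Prop :=
  InRng n p ∧ gcell g p.1 p.2 = 0 ∧ ∃ v ∈ nbrs p, InRng n v ∧ gcell g v.1 v.2 = 1

def Shape (garden g : List (List Int)) : Prop :=
  g.length = garden.length ∧ ∀ i : Nat, (g.getD i []).length = (garden.getD i []).length

noncomputable def onesN (g : List (List Int)) (n : Int) : Nat :=
  ((Finset.Ico 0 n ×ˢ Finset.Ico 0 n).filter (fun p : Int × Int => gcell g p.1 p.2 = 1)).card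

lemma nbrs_symm {u p : Int × Int} (h : u ∈ nbrs p) : p ∈ nbrs u := by
  simp only [nbrs, List.mem_cons, List.not_mem_nil, or_false, Prod.ext_iff] at h ⊢
  rcases h with h | h | h | h
  · right; left; omega
  · left; omega
  · right; right; right; omega
  · right; right; left; omega

lemma mem_boundaryList (g : List (List Int)) (n : Int) (p : Int × Int) :
    p ∈ boundaryList g n ↔ Bnd g n p := by
  obtain ⟨i, j⟩ := p
  simp only [boundaryList, List.mem_flatMap, List.mem_map, List.mem_filter,
    PySem.List.mem_pyRange_one, bndB, Bool.and_eq_true, Bool.or_eq_true, beq_iff_eq,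
    decide_eq_true_eq, Bnd, InRng, nbrs, List.mem_cons, List.not_mem_nil, or_false,
    Prod.ext_iff]
  constructor
  · rintro ⟨a, ⟨ha0, han⟩, b, ⟨⟨hb0, hbn⟩, h0, hnb⟩, hba, hbb⟩
    subst hba hbb
    refine ⟨⟨ha0, han, hb0, hbn⟩, h0, ?_⟩
    rcases hnb with ((⟨h1, h2⟩ | ⟨h1, h2⟩) | ⟨h1, h2⟩) | ⟨h1, h2⟩
    · exact ⟨(a - 1, b), by simp, by omega, h2⟩
    · exact ⟨(a + 1, b), by simp, by omega, h2⟩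
    · exact ⟨(a, b - 1), by simp, by omega, h2⟩
    · exact ⟨(a, b + 1), by simp, by omega, h2⟩
  · rintro ⟨⟨h0i, hin, h0j, hjn⟩, h0, v, hv, ⟨g1, g2, g3, g4⟩, hv1⟩
    obtain ⟨vr, vc⟩ := v
    refine ⟨i, ⟨h0i, hin⟩, j, ⟨⟨h0j, hjn⟩, h0, ?_⟩, rfl, rfl⟩
    rcases hv with ⟨e1, e2⟩ | ⟨e1, e2⟩ | ⟨e1, e2⟩ | ⟨e1, e2⟩ <;> subst e1 e2 <;>
      simp only at g1 g2 g3 g4 hv1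
    · left; left; right
      exact ⟨g2, hv1⟩
    · left; left; left
      exact ⟨by omega, hv1⟩
    · left; right
      exact ⟨by omega, hv1⟩
    · right
      exact ⟨g4, hv1⟩

lemma rowlen_ge (garden : List (List Int)) (hpre : Pre_solution garden) (i : Nat)
    (hi : i < garden.length) : garden.length ≤ (garden.getD i []).length := by
  have hmem : garden.getD i [] ∈ garden := by
    rw [List.getD_eq_getElem _ _ hi]
    exact List.getElem_mem hi
  have := hpre _ hmem
  omega

lemma shape_gsetOne (garden g : List (List Int)) (n : Int)
    (hn : n = (garden.length : Int)) (hs : Shape garden g)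
    (p : Int × Int) (hp : InRng n p) : Shape garden (gsetOne g p.1 p.2) := by
  obtain ⟨h1, h2, h3, h4⟩ := hp
  obtain ⟨hl, hr⟩ := hs
  constructor
  · rw [length_gsetOne g p.1 p.2 h1 h3]; exact hl
  · intro i
    rw [rowlen_gsetOne g p.1 p.2 h1 (by omega) h3 i]
    exact hr i

lemma shape_setAll (garden g : List (List Int)) (n : Int)
    (hn : n = (garden.length : Int)) (hs : Shape garden g)
    (b : List (Int × Int)) (hb : ∀ p ∈ b, InRng n p) :
    Shape garden (setAllB g b) := by
  induction b generalizing g with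
  | nil => exact hs
  | cons p rest ih =>
    show Shape garden (setAllB (gsetOne g p.1 p.2) rest)
    exact ih (gsetOne g p.1 p.2)
      (shape_gsetOne garden g n hn hs p (hb p (by simp)))
      (fun q hq => hb q (by simp [hq]))

lemma gcell_setAll (garden : List (List Int)) (n : Int)
    (hn : n = (garden.length : Int)) (hpre : Pre_solution garden) :
    ∀ (b : List (Int × Int)) (g : List (List Int)), Shape garden g →
      (∀ p ∈ b, InRng n p) → ∀ r c : Int, 0 ≤ r → 0 ≤ c →
      gcell (setAllB g b) r c = if (r, c) ∈ b then 1 else gcell g r c := by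
  intro b
  induction b with
  | nil => intro g _ _ r c _ _; simp [setAllB]
  | cons p rest ih =>
    intro g hs hb r c hr hc
    obtain ⟨h1, h2, h3, h4⟩ := hb p (by simp)
    have hrl : p.1 < (g.length : Int) := by
      have := hs.1; omega
    have hcl : p.2 < ((g.getD p.1.toNat []).length : Int) := by
      have h5 := hs.2 p.1.toNat
      have h6 := rowlen_ge garden hpre p.1.toNat (by omega)
      omega
    have hstep : setAllB g (p :: rest) = setAllB (gsetOne g p.1 p.2) rest := rfl
    rw [hstep, ih (gsetOne g p.1 p.2)
      (shape_gsetOne garden g n hn hs p ⟨h1, h2, h3, h4⟩)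
      (fun q hq => hb q (by simp [hq])) r c hr hc,
      gcell_gsetOne g p.1 p.2 r c h1 hrl h3 hcl hr hc]
    by_cases hm : (r, c) ∈ rest
    · rw [if_pos hm, if_pos (by simp [hm])]
    · rw [if_neg hm]
      by_cases he : (r, c) = p
      · rw [if_pos (by subst he; exact ⟨rfl, rfl⟩), if_pos (by simp [he])]
      · have : ¬ (r = p.1 ∧ c = p.2) := by
          intro ⟨e1, e2⟩; exact he (Prod.ext e1 e2)
        rw [if_neg this, if_neg (by simp [he, hm])]

lemma setAll_eq_of_memEq (garden g : List (List Int)) (n : Int)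
    (hn : n = (garden.length : Int)) (hpre : Pre_solution garden) (hs : Shape garden g)
    (b1 b2 : List (Int × Int)) (h1 : ∀ p ∈ b1, InRng n p) (h2 : ∀ p ∈ b2, InRng n p)
    (hmem : ∀ p, p ∈ b1 ↔ p ∈ b2) : setAllB g b1 = setAllB g b2 := by
  have hs1 := shape_setAll garden g n hn hs b1 h1
  have hs2 := shape_setAll garden g n hn hs b2 h2
  apply List.ext_getElem (by rw [hs1.1, hs2.1])
  intro i hi1 hi2
  apply List.ext_getElem
  · have e1 := hs1.2 i
    have e2 := hs2.2 i
    rw [List.getD_eq_getElem _ _ hi1] at e1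
    rw [List.getD_eq_getElem _ _ hi2] at e2
    rw [e1, e2]
  · intro j hj1 hj2
    have hir : (0:Int) ≤ (i:Int) := by positivity
    have hjr : (0:Int) ≤ (j:Int) := by positivity
    have hv1 := gcell_setAll garden n hn hpre b1 g hs h1 (i:Int) (j:Int) hir hjr
    have hv2 := gcell_setAll garden n hn hpre b2 g hs h2 (i:Int) (j:Int) hir hjr
    have hget : ∀ (G : List (List Int)) (hi : i < G.length) (hj : j < G[i].length),
        gcell G (i:Int) (j:Int) = G[i][j] := by
      intro G hgi hgj
      rw [gcell_nonneg _ _ _ (by positivity) (by positivity)]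
      simp only [Int.toNat_natCast]
      rw [List.getD_eq_getElem _ _ hgi, List.getD_eq_getElem _ _ hgj]
    rw [← hget _ hi1 hj1, ← hget _ hi2 hj2, hv1, hv2]
    by_cases hm : ((i:Int), (j:Int)) ∈ b1
    · rw [if_pos hm, if_pos ((hmem _).1 hm)]
    · rw [if_neg hm, if_neg (fun hx => hm ((hmem _).2 hx))]

lemma sq_card (n : Int) (hn : 0 ≤ n) :
    ((Finset.Ico 0 n ×ˢ Finset.Ico 0 n).card : Int) = n * n := by
  rw [Finset.card_product, Int.card_Ico]
  push_cast
  rw [Int.toNat_of_nonneg (by omega)]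
  ring

lemma onesN_le (g : List (List Int)) (n : Int) (hn : 0 ≤ n) :
    (onesN g n : Int) ≤ n * n := by
  rw [← sq_card n hn]
  exact_mod_cast Finset.card_filter_le _ _

lemma mem_sq (n : Int) (p : Int × Int) :
    p ∈ Finset.Ico 0 n ×ˢ Finset.Ico 0 n ↔ InRng n p := by
  simp [Finset.mem_product, Finset.mem_Ico, InRng, and_assoc]

lemma onesN_full (g : List (List Int)) (n : Int) (hn : 0 ≤ n)
    (h : (onesN g n : Int) = n * n) : ∀ p, InRng n p → gcell g p.1 p.2 = 1 := by
  intro p hp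
  have hsub : (Finset.Ico 0 n ×ˢ Finset.Ico 0 n).filter
      (fun p : Int × Int => gcell g p.1 p.2 = 1) = Finset.Ico 0 n ×ˢ Finset.Ico 0 n := by
    apply Finset.eq_of_subset_of_card_le (Finset.filter_subset _ _)
    have : ((Finset.Ico 0 n ×ˢ Finset.Ico 0 n).card : Int) = (onesN g n : Int) := by
      rw [sq_card n hn, h]
    show (Finset.Ico 0 n ×ˢ Finset.Ico 0 n).card ≤ onesN g n
    omega
  have hpm : p ∈ (Finset.Ico 0 n ×ˢ Finset.Ico 0 n).filter
      (fun p : Int × Int => gcell g p.1 p.2 = 1) := by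
    rw [hsub, mem_sq]; exact hp
  exact (Finset.mem_filter.1 hpm).2

lemma full_onesN (g : List (List Int)) (n : Int) (hn : 0 ≤ n)
    (h : ∀ p, InRng n p → gcell g p.1 p.2 = 1) : (onesN g n : Int) = n * n := by
  unfold onesN
  rw [Finset.filter_true_of_mem (fun p hp => h p ((mem_sq n p).1 hp)), sq_card n hn]

lemma onesN_mono (g1 g2 : List (List Int)) (n : Int)
    (h : ∀ p, InRng n p → gcell g1 p.1 p.2 = 1 → gcell g2 p.1 p.2 = 1) :
    onesN g1 n ≤ onesN g2 n := by
  apply Finset.card_le_card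
  intro p hp
  rw [Finset.mem_filter] at hp ⊢
  exact ⟨hp.1, h p ((mem_sq n p).1 hp.1) hp.2⟩

lemma onesN_strict (g1 g2 : List (List Int)) (n : Int)
    (h : ∀ p, InRng n p → gcell g1 p.1 p.2 = 1 → gcell g2 p.1 p.2 = 1)
    (p : Int × Int) (hp : InRng n p) (h1 : gcell g1 p.1 p.2 ≠ 1) (h2 : gcell g2 p.1 p.2 = 1) :
    onesN g1 n < onesN g2 n := by
  apply Finset.card_lt_card
  rw [Finset.ssubset_iff_of_subset]
  · exact ⟨p, Finset.mem_filter.2 ⟨(mem_sq n p).2 hp, h2⟩,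
      fun hmem => h1 (Finset.mem_filter.1 hmem).2⟩
  · intro q hq
    rw [Finset.mem_filter] at hq ⊢
    exact ⟨hq.1, h q ((mem_sq n q).1 hq.1) hq.2⟩

lemma onesN_pos (g : List (List Int)) (n : Int) (p : Int × Int)
    (hp : InRng n p) (h1 : gcell g p.1 p.2 = 1) : 1 ≤ onesN g n := by
  have : p ∈ (Finset.Ico 0 n ×ˢ Finset.Ico 0 n).filter
      (fun p : Int × Int => gcell g p.1 p.2 = 1) :=
    Finset.mem_filter.2 ⟨(mem_sq n p).2 hp, h1⟩
  exact Finset.card_pos.2 ⟨p, this⟩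

lemma setAll_append (g : List (List Int)) (b : List (Int × Int)) (p : Int × Int) :
    setAllB g (b ++ [p]) = gsetOne (setAllB g b) p.1 p.2 := by
  simp [setAllB, List.foldl_append]

lemma onesN_flip (garden g : List (List Int)) (n : Int)
    (hn : n = (garden.length : Int)) (hpre : Pre_solution garden) (hs : Shape garden g)
    (b : List (Int × Int)) (hb : ∀ p ∈ b, InRng n p) (p : Int × Int) (hp : InRng n p)
    (h0 : gcell (setAllB g b) p.1 p.2 = 0) :
    onesN (setAllB g (b ++ [p])) n = onesN (setAllB g b) n + 1 := by
  obtain ⟨h1, h2, h3, h4⟩ := hp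
  have hsb := shape_setAll garden g n hn hs b hb
  have hrl : p.1 < ((setAllB g b).length : Int) := by
    have := hsb.1; omega
  have hcl : p.2 < (((setAllB g b).getD p.1.toNat []).length : Int) := by
    have h5 := hsb.2 p.1.toNat
    have h6 := rowlen_ge garden hpre p.1.toNat (by omega)
    omega
  unfold onesN
  rw [show (Finset.Ico 0 n ×ˢ Finset.Ico 0 n).filter
      (fun q : Int × Int => gcell (setAllB g (b ++ [p])) q.1 q.2 = 1) =
      insert p ((Finset.Ico 0 n ×ˢ Finset.Ico 0 n).filter
      (fun q : Int × Int => gcell (setAllB g b) q.1 q.2 = 1)) from ?_]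
  · rw [Finset.card_insert_of_notMem]
    intro hmem
    have := (Finset.mem_filter.1 hmem).2
    omega
  · ext q
    rw [Finset.mem_insert, Finset.mem_filter, Finset.mem_filter, mem_sq]
    constructor
    · rintro ⟨hq, hv⟩
      rw [setAll_append, gcell_gsetOne _ _ _ _ _ h1 hrl h3 hcl hq.1 hq.2.2.1] at hv
      by_cases he : q.1 = p.1 ∧ q.2 = p.2
      · left; exact Prod.ext he.1 he.2
      · right
        rw [if_neg he] at hv
        exact ⟨hq, hv⟩
    · rintro (rfl | ⟨hq, hv⟩)
      · refine ⟨⟨h1, h2, h3, h4⟩, ?_⟩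
        rw [setAll_append, gcell_gsetOne _ _ _ _ _ h1 hrl h3 hcl h1 h3, if_pos ⟨rfl, rfl⟩]
      · refine ⟨hq, ?_⟩
        rw [setAll_append, gcell_gsetOne _ _ _ _ _ h1 hrl h3 hcl hq.1 hq.2.2.1]
        by_cases he : q.1 = p.1 ∧ q.2 = p.2
        · rw [if_pos he]
        · rw [if_neg he]; exact hv

lemma fullB_iff (g : List (List Int)) (n : Int) :
    fullB g n = true ↔ ∀ p, InRng n p → gcell g p.1 p.2 = 1 := by
  simp only [fullB, List.all_eq_true, PySem.List.mem_pyRange_one, beq_iff_eq, InRng]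
  constructor
  · rintro h ⟨a, b⟩ ⟨h1, h2, h3, h4⟩
    exact h a ⟨h1, h2⟩ b ⟨h3, h4⟩
  · intro h a ⟨h1, h2⟩ b ⟨h3, h4⟩
    exact h (a, b) ⟨h1, h2, h3, h4⟩

-- the per-round simulation --------------------------------------------------

def RInv (g : List (List Int)) (n : Int) (added : List (Int × Int)) (cnt : Int) : Prop :=
  (∀ p ∈ added, Bnd g n p) ∧ cnt = (onesN (setAllB g added) n : Int) ∧ cnt < n * n

def FullPay (g : List (List Int)) (n : Int) : Prop :=
  ∃ L, (∀ p ∈ L, Bnd g n p) ∧ (onesN (setAllB g L) n : Int) = n * n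

lemma stepA_sim (garden g : List (List Int)) (n t : Int)
    (hn : n = (garden.length : Int)) (hpre : Pre_solution garden) (hs : Shape garden g)
    (p : Int × Int) (hwit : InRng n p → gcell g p.1 p.2 = 0 → Bnd g n p)
    (added rest : List (Int × Int)) (cnt : Int) (hRI : RInv g n added cnt) :
    (stepA n t p (.inr (setAllB g added, rest ++ added, cnt)) = .inl t ∧ FullPay g n) ∨
    (∃ added2, (added2 = added ∨ added2 = added ++ [p]) ∧
      stepA n t p (.inr (setAllB g added, rest ++ added, cnt)) =
        .inr (setAllB g added2, rest ++ added2, (onesN (setAllB g added2) n : Int)) ∧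
      RInv g n added2 ((onesN (setAllB g added2) n : Int)) ∧
      (InRng n p → gcell g p.1 p.2 = 0 → p ∈ added2)) := by
  obtain ⟨hB, hcnt, hlt⟩ := hRI
  have hbr : ∀ q ∈ added, InRng n q := fun q hq => (hB q hq).1
  have hchar := gcell_setAll garden n hn hpre added g hs hbr
  by_cases hg : 0 ≤ p.1 ∧ p.1 < n ∧ 0 ≤ p.2 ∧ p.2 < n ∧ gcell (setAllB g added) p.1 p.2 = 0
  · -- the guard fires: p is a fresh empty in-range cell
    obtain ⟨h1, h2, h3, h4, h5⟩ := hg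
    have hp : InRng n p := ⟨h1, h2, h3, h4⟩
    have hfresh : p ∉ added ∧ gcell g p.1 p.2 = 0 := by
      have := hchar p.1 p.2 h1 h3
      rw [Prod.mk.eta] at this
      rw [this] at h5
      by_cases hm : p ∈ added
      · rw [if_pos hm] at h5; omega
      · rw [if_neg hm] at h5; exact ⟨hm, h5⟩
    have hBp : Bnd g n p := hwit hp hfresh.2
    have hflip := onesN_flip garden g n hn hpre hs added hbr p hp h5
    have hBall : ∀ q ∈ added ++ [p], Bnd g n q := by
      intro q hq
      rcases List.mem_append.1 hq with h | h
      · exact hB q h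
      · rw [List.mem_singleton.1 h]; exact hBp
    have hcnt1 : (onesN (setAllB g (added ++ [p])) n : Int) = cnt + 1 := by
      rw [hflip]; push_cast; omega
    rw [stepA_inr, if_pos ⟨h1, h2, h3, h4, h5⟩]
    by_cases hfin : cnt + 1 = n * n
    · rw [if_pos hfin]
      exact Or.inl ⟨rfl, ⟨added ++ [p], hBall, by omega⟩⟩
    · rw [if_neg hfin]
      have hle := onesN_le (setAllB g (added ++ [p])) n (by omega)
      refine Or.inr ⟨added ++ [p], Or.inr rfl, ?_, ⟨hBall, rfl, by omega⟩, fun _ _ => by simp⟩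
      rw [hcnt1, setAll_append, List.append_assoc]
  · -- the guard does not fire: nothing changes
    rw [stepA_inr, if_neg hg]
    refine Or.inr ⟨added, Or.inl rfl, by rw [← hcnt], by rw [← hcnt]; exact ⟨hB, hcnt, hlt⟩,
      ?_⟩
    intro hp h0
    obtain ⟨h1, h2, h3, h4⟩ := hp
    have h5 : ¬ gcell (setAllB g added) p.1 p.2 = 0 := by tauto
    have := hchar p.1 p.2 h1 h3
    rw [Prod.mk.eta] at this
    rw [this] at h5
    by_cases hm : p ∈ added
    · exact hm
    · rw [if_neg hm] at h5; exact absurd h0 h5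

lemma neighA_sim (garden g : List (List Int)) (n t : Int)
    (hn : n = (garden.length : Int)) (hpre : Pre_solution garden) (hs : Shape garden g)
    (v : Int × Int) (hv1 : InRng n v) (hv2 : gcell g v.1 v.2 = 1)
    (added rest : List (Int × Int)) (cnt : Int) (hRI : RInv g n added cnt) :
    (neighA n t v.1 v.2 (setAllB g added, rest ++ added, cnt) = .inl t ∧ FullPay g n) ∨
    (∃ added2,
      neighA n t v.1 v.2 (setAllB g added, rest ++ added, cnt) =
        .inr (setAllB g added2, rest ++ added2, (onesN (setAllB g added2) n : Int)) ∧
      RInv g n added2 ((onesN (setAllB g added2) n : Int)) ∧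
      (∀ p ∈ added, p ∈ added2) ∧
      (∀ p ∈ nbrs v, InRng n p → gcell g p.1 p.2 = 0 → p ∈ added2)) := by
  obtain ⟨vr, vc⟩ := v
  have hw : ∀ u ∈ nbrs (vr, vc), (InRng n u → gcell g u.1 u.2 = 0 → Bnd g n u) :=
    fun u hu h0 h1 => ⟨h0, h1, (vr, vc), nbrs_symm hu, hv1, hv2⟩
  have hmono : ∀ (a1 a2 : List (Int × Int)) (u : Int × Int),
      (a2 = a1 ∨ a2 = a1 ++ [u]) → ∀ q ∈ a1, q ∈ a2 := by
    rintro a1 a2 u (rfl | rfl) q hq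
    · exact hq
    · exact List.mem_append.2 (Or.inl hq)
  rw [neighA_unfold]
  simp only []
  rcases stepA_sim garden g n t hn hpre hs (vr + 1, vc) (hw _ (by simp [nbrs]))
      added rest cnt hRI with ⟨he, hF⟩ | ⟨a1, hs1, he1, hRI1, hk1⟩
  · rw [he, stepA_inl, stepA_inl, stepA_inl]
    exact Or.inl ⟨rfl, hF⟩
  rw [he1]
  rcases stepA_sim garden g n t hn hpre hs (vr - 1, vc) (hw _ (by simp [nbrs]))
      a1 rest _ hRI1 with ⟨he, hF⟩ | ⟨a2, hs2, he2, hRI2, hk2⟩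
  · rw [he, stepA_inl, stepA_inl]
    exact Or.inl ⟨rfl, hF⟩
  rw [he2]
  rcases stepA_sim garden g n t hn hpre hs (vr, vc - 1) (hw _ (by simp [nbrs]))
      a2 rest _ hRI2 with ⟨he, hF⟩ | ⟨a3, hs3, he3, hRI3, hk3⟩
  · rw [he, stepA_inl]
    exact Or.inl ⟨rfl, hF⟩
  rw [he3]
  rcases stepA_sim garden g n t hn hpre hs (vr, vc + 1) (hw _ (by simp [nbrs]))
      a3 rest _ hRI3 with ⟨he, hF⟩ | ⟨a4, hs4, he4, hRI4, hk4⟩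
  · exact Or.inl ⟨he, hF⟩
  rw [he4]
  have m12 := hmono a1 a2 _ hs2
  have m23 := hmono a2 a3 _ hs3
  have m34 := hmono a3 a4 _ hs4
  refine Or.inr ⟨a4, rfl, hRI4, ?_, ?_⟩
  · exact fun q hq => m34 _ (m23 _ (m12 _ (hmono added a1 _ hs1 q hq)))
  · intro p hp hin h0
    simp only [nbrs, List.mem_cons, List.not_mem_nil, or_false] at hp
    rcases hp with rfl | rfl | rfl | rfl
    · exact m34 _ (m23 _ (m12 _ (hk1 hin h0)))
    · exact m34 _ (m23 _ (hk2 hin h0))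
    · exact m34 _ (hk3 hin h0)
    · exact hk4 hin h0

lemma roundA_sim (garden g : List (List Int)) (n t : Int)
    (hn : n = (garden.length : Int)) (hpre : Pre_solution garden) (hs : Shape garden g) :
    ∀ (toProc added : List (Int × Int)) (cnt : Int),
      (∀ p ∈ toProc, InRng n p ∧ gcell g p.1 p.2 = 1) →
      RInv g n added cnt →
      cnt = (onesN (setAllB g added) n : Int) →
      (∀ p, Bnd g n p → p ∈ added ∨ ∃ v ∈ toProc, v ∈ nbrs p) →
      (roundA n t toProc.length (setAllB g added, toProc ++ added, cnt) = .inl t ∧ FullPay g n) ∨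
      (∃ added2,
        roundA n t toProc.length (setAllB g added, toProc ++ added, cnt) =
          .inr (setAllB g added2, added2, (onesN (setAllB g added2) n : Int)) ∧
        RInv g n added2 ((onesN (setAllB g added2) n : Int)) ∧
        (∀ p, Bnd g n p → p ∈ added2)) := by
  intro toProc
  induction toProc with
  | nil =>
    intro added cnt htp hRI hcnt hcov
    right
    refine ⟨added, ?_, by rw [← hcnt]; exact hRI, ?_⟩
    · show Sum.inr (setAllB g added, [] ++ added, cnt) =
        Sum.inr (setAllB g added, added, (onesN (setAllB g added) n : Int))
      rw [List.nil_append, hcnt]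
    · intro p hp
      rcases hcov p hp with h | ⟨v, hv, -⟩
      · exact h
      · cases hv
  | cons v rest ih =>
    intro added cnt htp hRI hcnt hcov
    obtain ⟨vr, vc⟩ := v
    obtain ⟨hvin, hv1⟩ := htp (vr, vc) (by simp)
    have hstep : roundA n t ((vr, vc) :: rest).length
        (setAllB g added, ((vr, vc) :: rest) ++ added, cnt) =
        match neighA n t vr vc (setAllB g added, rest ++ added, cnt) with
        | .inl w => .inl w
        | .inr st' => roundA n t rest.length st' := rfl
    rw [hstep]
    rcases neighA_sim garden g n t hn hpre hs (vr, vc) hvin hv1 added rest cnt hRI with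
      ⟨he, hF⟩ | ⟨a2, he2, hRI2, hm2, hk2⟩
    · rw [he]
      exact Or.inl ⟨rfl, hF⟩
    rw [he2]
    have hcov2 : ∀ p, Bnd g n p → p ∈ a2 ∨ ∃ u ∈ rest, u ∈ nbrs p := by
      intro p hp
      rcases hcov p hp with h | ⟨u, hu, hun⟩
      · exact Or.inl (hm2 p h)
      · rcases List.mem_cons.1 hu with rfl | hur
        · exact Or.inl (hk2 p (nbrs_symm hun) hp.1 hp.2.1)
        · exact Or.inr ⟨u, hur, hun⟩
    exact ih a2 _ (fun q hq => htp q (by simp [hq])) hRI2 rfl hcov2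

-- the loop simulation -------------------------------------------------------

def LInv (garden g : List (List Int)) (n : Int) (q : List (Int × Int)) (cnt : Int) : Prop :=
  Shape garden g ∧ (∀ p ∈ q, InRng n p ∧ gcell g p.1 p.2 = 1) ∧
  (∀ p, InRng n p → gcell g p.1 p.2 = 1 →
    (∃ u ∈ nbrs p, InRng n u ∧ gcell g u.1 u.2 = 0) → p ∈ q) ∧
  cnt = (onesN g n : Int) ∧ cnt < n * n

lemma loop_sim (garden : List (List Int)) (n : Int)
    (hn : n = (garden.length : Int)) (hpre : Pre_solution garden) :
    ∀ (fa fb : Nat) (g : List (List Int)) (q : List (Int × Int)) (cnt t : Int),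
      LInv garden g n q cnt →
      (n * n - cnt).toNat + 2 ≤ fa → (n * n - cnt).toNat + 2 ≤ fb →
      loopA n fa (g, q, cnt) t = loopB n fb g t := by
  have hn0 : (0:Int) ≤ n := by omega
  intro fa
  induction fa with
  | zero => intro fb g q cnt t _ hfa _; omega
  | succ f ih =>
    intro fb g q cnt t hI hfa hfb
    obtain ⟨hs, hq1, hact, hcnt, hlt⟩ := hI
    obtain ⟨fb', rfl⟩ : ∃ fb', fb = fb' + 1 := ⟨fb - 1, by omega⟩
    have hloopB : loopB n (fb' + 1) g t =
        if boundaryList g n = [] then (if fullB g n then some t else none)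
        else loopB n fb' (setAllB g (boundaryList g n)) (t + 1) := rfl
    have hnotfull : fullB g n = false := by
      rcases hfull : fullB g n with _ | _
      · rfl
      · have := full_onesN g n hn0 (fullB_iff g n |>.1 hfull)
        omega
    cases q with
    | nil =>
      have hbl : boundaryList g n = [] := by
        rw [List.eq_nil_iff_forall_not_mem]
        intro p hp
        rw [mem_boundaryList] at hp
        obtain ⟨hin, h0, u, hu, huin, hu1⟩ := hp
        exact absurd (hact u huin hu1 ⟨p, nbrs_symm hu, hin, h0⟩) (by simp)
      show none = loopB n (fb' + 1) g t
      rw [hloopB, if_pos hbl, hnotfull]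
      rfl
    | cons v vs =>
      have hA : loopA n (f + 1) (g, v :: vs, cnt) t =
          match roundA n (t + 1) (v :: vs).length (g, v :: vs, cnt) with
          | .inl w => some w
          | .inr st' => loopA n f st' (t + 1) := rfl
      have hround := roundA_sim garden g n (t + 1) hn hpre hs (v :: vs) [] cnt hq1
        ⟨by simp, by simp [setAllB]; omega, hlt⟩ (by simp [setAllB]; omega)
        (by
          intro p hp
          obtain ⟨hin, h0, u, hu, huin, hu1⟩ := hp
          exact Or.inr ⟨u, hact u huin hu1 ⟨p, nbrs_symm hu, hin, h0⟩, hu⟩)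
      rw [List.append_nil] at hround
      simp only [setAllB, List.foldl_nil] at hround
      rw [hA]
      rcases hround with ⟨he, L, hL, hones⟩ | ⟨a2, heq, hRI2, hcov2⟩
      · -- the round completes the grid: A early-returns t+1, B does one more pass
        rw [he]
        have hLm : ∀ p ∈ L, InRng n p := fun p hp => (hL p hp).1
        have hLne : L ≠ [] := by
          intro h
          rw [h] at hones
          simp only [setAllB, List.foldl_nil] at hones
          omega
        obtain ⟨p0, hp0⟩ := List.exists_mem_of_ne_nil L hLne
        have hblne : boundaryList g n ≠ [] :=
          List.ne_nil_of_mem ((mem_boundaryList g n p0).2 (hL p0 hp0))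
        have hblm : ∀ p ∈ boundaryList g n, InRng n p :=
          fun p hp => ((mem_boundaryList g n p).1 hp).1
        have hmono : onesN (setAllB g L) n ≤ onesN (setAllB g (boundaryList g n)) n := by
          apply onesN_mono
          intro p hp h1
          rw [gcell_setAll garden n hn hpre L g hs hLm p.1 p.2 hp.1 hp.2.2.1,
            Prod.mk.eta] at h1
          rw [gcell_setAll garden n hn hpre _ g hs hblm p.1 p.2 hp.1 hp.2.2.1, Prod.mk.eta]
          by_cases hm : p ∈ boundaryList g n
          · rw [if_pos hm]
          · rw [if_neg hm]
            by_cases hm2 : p ∈ L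
            · exact absurd ((mem_boundaryList g n p).2 (hL p hm2)) hm
            · rw [if_neg hm2] at h1; exact h1
        have hfull2 : (onesN (setAllB g (boundaryList g n)) n : Int) = n * n := by
          have := onesN_le (setAllB g (boundaryList g n)) n hn0
          omega
        have hfullg2 := onesN_full _ n hn0 hfull2
        have hbl2 : boundaryList (setAllB g (boundaryList g n)) n = [] := by
          rw [List.eq_nil_iff_forall_not_mem]
          intro p hp
          rw [mem_boundaryList] at hp
          obtain ⟨hin, h0, -⟩ := hp
          have := hfullg2 p hin
          omega
        have hfb2 : fullB (setAllB g (boundaryList g n)) n = true :=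
          (fullB_iff _ n).2 hfullg2
        show some (t + 1) = loopB n (fb' + 1) g t
        rw [hloopB, if_neg hblne]
        obtain ⟨fb'', rfl⟩ : ∃ fb'', fb' = fb'' + 1 := ⟨fb' - 1, by omega⟩
        show some (t + 1) =
          if boundaryList (setAllB g (boundaryList g n)) n = []
          then (if fullB (setAllB g (boundaryList g n)) n then some (t + 1) else none)
          else loopB n fb'' (setAllB (setAllB g (boundaryList g n))
            (boundaryList (setAllB g (boundaryList g n)) n)) (t + 1 + 1)
        rw [hbl2, hfb2]
        rfl
      · -- the round did not complete the grid
        rw [heq]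
        have ha2m : ∀ p ∈ a2, InRng n p := fun p hp => (hRI2.1 p hp).1
        cases a2 with
        | nil =>
          -- nothing marked: A's queue empties, B's scan finds nothing
          have hbl : boundaryList g n = [] := by
            rw [List.eq_nil_iff_forall_not_mem]
            intro p hp
            exact absurd (hcov2 p ((mem_boundaryList g n p).1 hp)) (by simp)
          simp only [setAllB, List.foldl_nil] at *
          obtain ⟨f', rfl⟩ : ∃ f', f = f' + 1 := ⟨f - 1, by omega⟩
          show none = loopB n (fb' + 1) g t
          rw [hloopB, if_pos hbl, hnotfull]
          rfl
        | cons a as =>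
          have hblne : boundaryList g n ≠ [] :=
            List.ne_nil_of_mem ((mem_boundaryList g n a).2 (hRI2.1 a (by simp)))
          have hblm : ∀ p ∈ boundaryList g n, InRng n p :=
            fun p hp => ((mem_boundaryList g n p).1 hp).1
          have hgeq : setAllB g (boundaryList g n) = setAllB g (a :: as) := by
            apply setAll_eq_of_memEq garden g n hn hpre hs _ _ hblm ha2m
            intro p
            rw [mem_boundaryList]
            exact ⟨fun hp => hcov2 p hp, fun hp => hRI2.1 p hp⟩
          rw [hloopB, if_neg hblne, hgeq]
          set g2 := setAllB g (a :: as) with hg2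
          have hchar := gcell_setAll garden n hn hpre (a :: as) g hs ha2m
          have hs2 : Shape garden g2 := shape_setAll garden g n hn hs _ ha2m
          have hmem2 : ∀ p ∈ (a :: as), gcell g2 p.1 p.2 = 1 := by
            intro p hp
            rw [hchar p.1 p.2 (ha2m p hp).1 (ha2m p hp).2.2.1, Prod.mk.eta, if_pos hp]
          have hact2 : ∀ p, InRng n p → gcell g2 p.1 p.2 = 1 →
              (∃ u ∈ nbrs p, InRng n u ∧ gcell g2 u.1 u.2 = 0) → p ∈ (a :: as) := by
            intro p hin h1 ⟨u, hu, huin, hu0⟩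
            rw [hchar u.1 u.2 huin.1 huin.2.2.1, Prod.mk.eta] at hu0
            by_cases hm : u ∈ (a :: as)
            · rw [if_pos hm] at hu0; omega
            · rw [if_neg hm] at hu0
              by_cases hp2 : p ∈ (a :: as)
              · exact hp2
              · rw [hchar p.1 p.2 hin.1 hin.2.2.1, Prod.mk.eta, if_neg hp2] at h1
                exact absurd (hcov2 u ⟨huin, hu0, p, nbrs_symm hu, hin, h1⟩) hm
          have hstrict : onesN g n < onesN g2 n := by
            apply onesN_strict g g2 n ?_ a (ha2m a (by simp)) ?_ (hmem2 a (by simp))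
            · intro p hp h1
              rw [hchar p.1 p.2 hp.1 hp.2.2.1, Prod.mk.eta]
              by_cases hm : p ∈ (a :: as)
              · rw [if_pos hm]
              · rw [if_neg hm]; exact h1
            · have := (hRI2.1 a (by simp)).2.1
              omega
          have hee : onesN (setAllB g (boundaryList g n)) n = onesN g2 n := by rw [hgeq]
          apply ih fb' g2 (a :: as) _ (t + 1)
            ⟨hs2, fun p hp => ⟨ha2m p hp, hmem2 p hp⟩, hact2, rfl, hRI2.2.2⟩
          · omega
          · omega

-- the source scan -----------------------------------------------------------

lemma scan_char (garden : List (List Int)) (n : Int) (hn : n = (garden.length : Int)) :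
    (∀ p, p ∈ (scanA garden n).1 ↔ (InRng n p ∧ gcell garden p.1 p.2 = 1)) ∧
    (scanA garden n).1.Nodup ∧
    (scanA garden n).2 = ((scanA garden n).1.length : Int) := by
  have hrow : ∀ (i : Int), 0 ≤ i → i < n → ∀ (k : Nat) (a : Int)
      (st : List (Int × Int) × Int), 0 ≤ a → (n - a).toNat = k →
      ((∀ p, p ∈ st.1 ↔ (InRng n p ∧ gcell garden p.1 p.2 = 1 ∧
          (p.1 < i ∨ (p.1 = i ∧ p.2 < a)))) ∧ st.1.Nodup ∧ st.2 = (st.1.length : Int)) →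
      ((∀ p, p ∈ ((PySem.List.pyRange a n 1).foldl (fun acc j =>
          if gcell garden i j = 1 then (acc.1 ++ [(i, j)], acc.2 + 1) else acc) st).1 ↔
          (InRng n p ∧ gcell garden p.1 p.2 = 1 ∧ (p.1 < i ∨ p.1 = i))) ∧
        ((PySem.List.pyRange a n 1).foldl (fun acc j =>
          if gcell garden i j = 1 then (acc.1 ++ [(i, j)], acc.2 + 1) else acc) st).1.Nodup ∧
        ((PySem.List.pyRange a n 1).foldl (fun acc j =>
          if gcell garden i j = 1 then (acc.1 ++ [(i, j)], acc.2 + 1) else acc) st).2 =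
          (((PySem.List.pyRange a n 1).foldl (fun acc j =>
          if gcell garden i j = 1 then (acc.1 ++ [(i, j)], acc.2 + 1) else acc) st).1.length : Int)) := by
    intro i h0i hin k
    induction k with
    | zero =>
      intro a st ha hk ⟨hm, hd, hc⟩
      rw [PySem.List.pyRange_one_eq_nil (by omega), List.foldl_nil]
      refine ⟨fun p => ?_, hd, hc⟩
      rw [hm p]
      constructor
      · rintro ⟨h1, h2, h3⟩
        exact ⟨h1, h2, by omega⟩
      · rintro ⟨h1, h2, h3⟩
        refine ⟨h1, h2, ?_⟩
        obtain ⟨-, -, -, h4⟩ := h1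
        omega
    | succ k ih =>
      intro a st ha hk ⟨hm, hd, hc⟩
      rw [PySem.List.pyRange_one_cons (by omega), List.foldl_cons]
      by_cases hg : gcell garden i a = 1
      · rw [if_pos hg]
        apply ih (a + 1) _ (by omega) (by omega)
        refine ⟨fun p => ?_, ?_, ?_⟩
        · show p ∈ st.1 ++ [(i, a)] ↔ _
          rw [List.mem_append, List.mem_singleton, hm p]
          constructor
          · rintro (⟨h1, h2, h3⟩ | rfl)
            · exact ⟨h1, h2, by omega⟩
            · exact ⟨⟨h0i, hin, ha, by omega⟩, hg, by omega⟩
          · rintro ⟨h1, h2, h3⟩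
            by_cases he : p = (i, a)
            · exact Or.inr he
            · left
              refine ⟨h1, h2, ?_⟩
              have : ¬ (p.1 = i ∧ p.2 = a) := by
                intro ⟨e1, e2⟩; exact he (Prod.ext e1 e2)
              omega
        · show (st.1 ++ [(i, a)]).Nodup
          rw [List.nodup_append]
          refine ⟨hd, List.nodup_singleton _, ?_⟩
          intro p hp b hb
          rw [List.mem_singleton] at hb
          subst hb
          intro heq
          obtain ⟨-, -, h3⟩ := (hm _).1 hp
          rw [heq] at h3
          have h3' : i < i ∨ (i = i ∧ a < a) := h3
          omega
        · show st.2 + 1 = ((st.1 ++ [(i, a)]).length : Int)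
          rw [List.length_append, hc, List.length_singleton]
          push_cast
          ring
      · rw [if_neg hg]
        apply ih (a + 1) _ (by omega) (by omega)
        refine ⟨fun p => ?_, hd, hc⟩
        rw [hm p]
        constructor
        · rintro ⟨h1, h2, h3⟩
          exact ⟨h1, h2, by omega⟩
        · rintro ⟨h1, h2, h3⟩
          refine ⟨h1, h2, ?_⟩
          by_cases he : p.1 = i ∧ p.2 = a
          · obtain ⟨vr, vc⟩ := p
            obtain ⟨e1, e2⟩ := he
            simp only at e1 e2
            subst e1 e2
            exact absurd h2 hg
          · omega
  have houter : ∀ (k : Nat) (a : Int) (st : List (Int × Int) × Int), 0 ≤ a → (n - a).toNat = k →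
      ((∀ p, p ∈ st.1 ↔ (InRng n p ∧ gcell garden p.1 p.2 = 1 ∧ p.1 < a)) ∧
        st.1.Nodup ∧ st.2 = (st.1.length : Int)) →
      ((∀ p, p ∈ ((PySem.List.pyRange a n 1).foldl (fun acc i => scanRowA garden n i acc) st).1 ↔
          (InRng n p ∧ gcell garden p.1 p.2 = 1)) ∧
        ((PySem.List.pyRange a n 1).foldl (fun acc i => scanRowA garden n i acc) st).1.Nodup ∧
        ((PySem.List.pyRange a n 1).foldl (fun acc i => scanRowA garden n i acc) st).2 =
          (((PySem.List.pyRange a n 1).foldl (fun acc i => scanRowA garden n i acc) st).1.length : Int)) := by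
    intro k
    induction k with
    | zero =>
      intro a st ha hk ⟨hm, hd, hc⟩
      rw [PySem.List.pyRange_one_eq_nil (by omega), List.foldl_nil]
      refine ⟨fun p => ?_, hd, hc⟩
      rw [hm p]
      constructor
      · rintro ⟨h1, h2, -⟩
        exact ⟨h1, h2⟩
      · rintro ⟨h1, h2⟩
        refine ⟨h1, h2, ?_⟩
        obtain ⟨-, h3, -, -⟩ := h1
        omega
    | succ k ih =>
      intro a st ha hk ⟨hm, hd, hc⟩
      rw [PySem.List.pyRange_one_cons (by omega), List.foldl_cons]
      apply ih (a + 1) _ (by omega) (by omega)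
      have hr := hrow a ha (by omega) (n - 0).toNat 0 st (by omega) (by omega)
        (⟨fun p => by
          rw [hm p]
          constructor
          · rintro ⟨h1, h2, h3⟩
            exact ⟨h1, h2, by omega⟩
          · rintro ⟨h1, h2, h3⟩
            refine ⟨h1, h2, ?_⟩
            obtain ⟨-, -, h4, -⟩ := h1
            omega, hd, hc⟩)
      obtain ⟨hm', hd', hc'⟩ := hr
      refine ⟨fun p => ?_, hd', hc'⟩
      show p ∈ (scanRowA garden n a st).1 ↔ _
      rw [show (scanRowA garden n a st) = (PySem.List.pyRange 0 n 1).foldl (fun acc j =>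
          if gcell garden a j = 1 then (acc.1 ++ [(a, j)], acc.2 + 1) else acc) st from rfl,
        hm' p]
      constructor
      · rintro ⟨h1, h2, h3⟩
        exact ⟨h1, h2, by omega⟩
      · rintro ⟨h1, h2, h3⟩
        exact ⟨h1, h2, by omega⟩
  have := houter n.toNat 0 ([], 0) (by omega) (by omega)
    ⟨fun p => by
      simp only [List.not_mem_nil, false_iff]
      rintro ⟨⟨h0p, -, -, -⟩, -, h3⟩
      omega, List.nodup_nil, by simp⟩
  exact this

lemma scan_cnt (garden : List (List Int)) (n : Int) (hn : n = (garden.length : Int)) :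
    (scanA garden n).2 = (onesN garden n : Int) := by
  obtain ⟨hm, hd, hc⟩ := scan_char garden n hn
  have hfs : (Finset.Ico 0 n ×ˢ Finset.Ico 0 n).filter
      (fun p : Int × Int => gcell garden p.1 p.2 = 1) = (scanA garden n).1.toFinset := by
    ext p
    rw [Finset.mem_filter, mem_sq, List.mem_toFinset, hm p]
  have : onesN garden n = (scanA garden n).1.length := by
    unfold onesN
    rw [hfs, List.toFinset_card_of_nodup hd]
  rw [hc, this]

-- main ----------------------------------------------------------------------

lemma pvMain (garden : List (List Int)) (hpre : Pre_solution garden) :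
    solution garden = solution_alt garden := by
  have hn : ((garden.length : Int)) = (garden.length : Int) := rfl
  set n : Int := (garden.length : Int) with hndef
  have hn0 : (0:Int) ≤ n := by positivity
  obtain ⟨hm, hd, hc⟩ := scan_char garden n hndef
  have hcnt := scan_cnt garden n hndef
  show (if (scanA garden n).2 = n * n then some 0
    else loopA n (garden.length * garden.length + 1) (garden, (scanA garden n).1, (scanA garden n).2) 0) =
    loopB n (garden.length * garden.length + 2) garden 0
  have hsq : ((garden.length * garden.length : Nat) : Int) = n * n := by
    push_cast [hndef]; ring
  by_cases hfull : (scanA garden n).2 = n * n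
  · -- the grid is all 1s from the start: A returns 0 before its loop,
    -- B's first pass finds no boundary and the full check succeeds
    rw [if_pos hfull]
    have hones : (onesN garden n : Int) = n * n := by omega
    have hfg := onesN_full garden n hn0 hones
    have hbl : boundaryList garden n = [] := by
      rw [List.eq_nil_iff_forall_not_mem]
      intro p hp
      rw [mem_boundaryList] at hp
      obtain ⟨hin, h0, -⟩ := hp
      have := hfg p hin
      omega
    have hfb : fullB garden n = true := (fullB_iff garden n).2 hfg
    show some 0 = loopB n (garden.length * garden.length + 2) garden 0
    obtain ⟨f, hf⟩ : ∃ f, garden.length * garden.length + 2 = f + 1 :=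
      ⟨garden.length * garden.length + 1, rfl⟩
    rw [hf]
    show some 0 = if boundaryList garden n = [] then (if fullB garden n then some 0 else none)
      else loopB n f (setAllB garden (boundaryList garden n)) 1
    rw [hbl, hfb]
    rfl
  · rw [if_neg hfull]
    have hle := onesN_le garden n hn0
    have hlt : (scanA garden n).2 < n * n := by omega
    rcases hq : (scanA garden n).1 with _ | ⟨v, vs⟩
    · -- no source at all (and not the empty grid): both sides give None
      have hno1 : ∀ p, ¬ (InRng n p ∧ gcell garden p.1 p.2 = 1) := by
        intro p hp
        have := (hm p).2 hp
        rw [hq] at this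
        exact absurd this (by simp)
      have hbl : boundaryList garden n = [] := by
        rw [List.eq_nil_iff_forall_not_mem]
        intro p hp
        rw [mem_boundaryList] at hp
        obtain ⟨-, -, u, -, huin, hu1⟩ := hp
        exact hno1 u ⟨huin, hu1⟩
      have hnf : fullB garden n = false := by
        rcases hfb : fullB garden n with _ | _
        · rfl
        · have := full_onesN garden n hn0 ((fullB_iff garden n).1 hfb)
          omega
      show loopA n (garden.length * garden.length + 1) (garden, [], (scanA garden n).2) 0 =
        loopB n (garden.length * garden.length + 2) garden 0
      obtain ⟨f, hf⟩ : ∃ f, garden.length * garden.length + 1 = f + 1 :=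
        ⟨garden.length * garden.length, rfl⟩
      obtain ⟨f2, hf2⟩ : ∃ f2, garden.length * garden.length + 2 = f2 + 1 :=
        ⟨garden.length * garden.length + 1, rfl⟩
      rw [hf, hf2]
      show none = if boundaryList garden n = [] then (if fullB garden n then some 0 else none)
        else loopB n f2 (setAllB garden (boundaryList garden n)) 1
      rw [hbl, hnf]
      rfl
    · -- at least one source: run the loop simulation
      have hv1 := (hm v).1 (by rw [hq]; simp)
      have hpos : 1 ≤ onesN garden n := onesN_pos garden n v hv1.1 hv1.2
      rw [← hq]
      apply loop_sim garden n hndef hpre _ _ garden (scanA garden n).1 (scanA garden n).2 0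
        ⟨⟨rfl, fun i => rfl⟩, fun p hp => (hm p).1 hp,
          fun p hin h1 _ => (hm p).2 ⟨hin, h1⟩, hcnt, hlt⟩
      · omega
      · omega

-- ===== VERDICT (by name: the statement is the Claim_ definition above) =====
theorem solution_spec : Claim_equal_solution := by
  unfold Claim_equal_solution
  intro garden _ hpre
  unfold Spec_solution
  exact pvMain garden hpre
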